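-- pv_equiv track=rewrite | github.com/PopLizardo11/Schedu-CLI | cyc_sched.py | find_ideal_sizes
-- ===== SOURCE A (Python) =====
-- def parse_columns(matrix: list[list[any]]) -> list[list[any]]:
--     # only works on an n x n matrix
--     columns: list[list[any]] = [[] for i in range(len(matrix[0]))]
--     for row in matrix:
--         for i, r in enumerate(row):
--             columns[i].append(r)
--     return columns
--
-- def find_ideal_sizes(sched: list[list[tuple[int]]]) -> list[int]:
--     str_sched: list[list[tuple[int]]] = [[] for n in range(len(sched))]
--     for i, hrs in enumerate(sched):
--         for h in hrs:
--             str_sched[i].append(len(str(h[1])))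
--     len_columns: list[list[int]] =  parse_columns(str_sched)
--
--     # finding the largest length
--     ideal_sizes: list[int] = []
--     for sizes in len_columns:
--         max_size = sizes[0]
--         for size in sizes:
--             max_size = size if size > max_size else max_size
--         ideal_sizes.append(max_size)
--
--     return ideal_sizes
-- ===== SOURCE B (Python) =====
-- def find_ideal_sizes(sched: list[list[tuple[int]]]) -> list[int]:
--     # One pass: keep running per-column maxima instead of building a length
--     # matrix, transposing it and scanning each column.
--     ideal_sizes = [len(str(h[1])) for h in sched[0]]
--     for row in sched[1:]:
--         for i, h in enumerate(row):
--             ideal_sizes[i] = max(ideal_sizes[i], len(str(h[1])))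
--     return ideal_sizes
-- ===== Notes on version B (the rewrite author's own statement) =====
-- stated objective: simpler
-- what changed: B maintains a single list of running column maxima updated in one pass over the rows, replacing A's three-stage pipeline (build a matrix of string lengths, transpose it with parse_columns, then scan each column for its max).
import Mathlib
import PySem

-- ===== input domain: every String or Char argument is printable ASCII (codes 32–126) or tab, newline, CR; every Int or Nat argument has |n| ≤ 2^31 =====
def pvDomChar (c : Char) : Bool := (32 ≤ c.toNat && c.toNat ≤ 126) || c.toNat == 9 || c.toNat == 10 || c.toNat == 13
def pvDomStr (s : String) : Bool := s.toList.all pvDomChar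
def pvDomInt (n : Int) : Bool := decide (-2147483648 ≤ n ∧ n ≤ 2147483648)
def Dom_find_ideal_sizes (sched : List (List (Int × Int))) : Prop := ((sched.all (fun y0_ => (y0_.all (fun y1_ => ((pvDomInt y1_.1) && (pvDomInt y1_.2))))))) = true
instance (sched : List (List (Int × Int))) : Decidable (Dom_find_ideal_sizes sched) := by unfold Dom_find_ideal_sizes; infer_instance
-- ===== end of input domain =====

-- B replaces A's build-lengths / transpose / per-column-scan pipeline by one pass
-- keeping running column maxima; equal return values proved on Pre_ (no mutation of the argument).

-- ===== PORT A =====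
-- columns[i].append(r) is a no-op in Lean where Python would raise IndexError (outside Pre_).
def parse_columns (matrix : List (List Int)) : List (List Int) :=
  matrix.foldl
    (fun cols row =>
      (row.zipIdx).foldl (fun cs p => cs.modify p.2 (fun c => c ++ [p.1])) cols)
    (List.replicate (matrix.headD []).length [])

-- str_sched[i].append into the i-th preallocated slot is ported as building row i
-- and appending it (i is always the current row's index); sizes[0] on an empty
-- column is ported as headD 0 (Python raises there, outside Pre_).
def find_ideal_sizes (sched : List (List (Int × Int))) : List Int :=
  let str_sched : List (List Int) :=
    sched.foldl
      (fun acc hrs =>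
        acc ++ [hrs.foldl (fun l h => l ++ [PySem.Str.len (PySem.Int.toStr h.2)]) []]) []
  let len_columns := parse_columns str_sched
  len_columns.foldl
    (fun ideal sizes =>
      ideal ++ [sizes.foldl (fun m s => if s > m then s else m) (sizes.headD 0)]) []

-- ===== PORT B =====
-- sched[0] on empty sched raises in Python (outside Pre_): ported as [] ;
-- ideal_sizes[i] = … is List.set (no-op where Python raises, outside Pre_).
def find_ideal_sizes_alt (sched : List (List (Int × Int))) : List Int :=
  match sched with
  | [] => []
  | first :: rest =>
    rest.foldl
      (fun sizes row =>
        (row.zipIdx).foldl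
          (fun sz p => sz.set p.2 (max (sz.getD p.2 0) (PySem.Str.len (PySem.Int.toStr p.1.2))))
          sizes)
      (first.map (fun h => PySem.Str.len (PySem.Int.toStr h.2)))

-- ===== PRECONDITION & SPEC =====
-- Pre_ excludes exactly the inputs on which A raises IndexError: the empty schedule
-- (str_sched[0] / matrix[0]) and schedules with a row longer than the first row
-- (columns[i].append out of range).
def Pre_find_ideal_sizes (sched : List (List (Int × Int))) : Prop :=
  sched ≠ [] ∧ ∀ row ∈ sched, row.length ≤ (sched.headD []).length
instance (sched : List (List (Int × Int))) : Decidable (Pre_find_ideal_sizes sched) := by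
  unfold Pre_find_ideal_sizes; infer_instance

def pvWitness_find_ideal_sizes : (List (List (Int × Int))) :=
  [[(1, 10), (2, -5)], [(3, 12345)]]

def Spec_find_ideal_sizes (sched : List (List (Int × Int))) (out : List Int) : Prop := out = find_ideal_sizes_alt sched
instance (sched : List (List (Int × Int))) (out : List Int) : Decidable (Spec_find_ideal_sizes sched out) := by unfold Spec_find_ideal_sizes; infer_instance

-- ===== CLAIM (what is proved, stated in full; the proofs are below) =====
def Claim_equal_find_ideal_sizes : Prop := ∀ (sched : List (List (Int × Int))), Dom_find_ideal_sizes sched → Pre_find_ideal_sizes sched → Spec_find_ideal_sizes sched (find_ideal_sizes sched)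

-- ===== LEMMAS AND PROOFS =====

-- len(str(h[1])) as one symbol for the proofs
def pvLen (h : Int × Int) : Int := PySem.Str.len (PySem.Int.toStr h.2)

-- an append-accumulating foldl is map
theorem pv_foldl_push {α β : Type} (f : α → β) (l : List α) (acc : List β) :
    l.foldl (fun a x => a ++ [f x]) acc = acc ++ l.map f := by
  induction l generalizing acc with
  | nil => simp
  | cons x xs ih => simp [ih]

-- foldl congruence for pointwise-equal step functions
theorem pv_foldl_ext {α β : Type} (f g : α → β → α) (h : ∀ a b, f a b = g a b) :
    ∀ (l : List β) (init : α), l.foldl f init = l.foldl g init := by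
  intro l
  induction l with
  | nil => intro init; rfl
  | cons x xs ih => intro init; rw [List.foldl_cons, List.foldl_cons, h, ih]

-- pointwise characterisation of A's inner append loop
theorem pv_charA (r : List Int) : ∀ (k : Nat) (cols : List (List Int)) (j : Nat),
    ((r.zipIdx k).foldl (fun cs p => cs.modify p.2 (fun c => c ++ [p.1])) cols)[j]? =
      if j < k then cols[j]?
      else match r[j - k]? with
        | some v => (cols[j]?).map (fun c => c ++ [v])
        | none => cols[j]? := by
  induction r with
  | nil =>
    intro k cols j
    simp only [List.zipIdx_nil, List.foldl_nil, List.getElem?_nil]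
    split <;> rfl
  | cons v vs ih =>
    intro k cols j
    rw [List.zipIdx_cons, List.foldl_cons, ih (k + 1)]
    rcases Nat.lt_trichotomy j k with h | rfl | h
    · rw [if_pos (by omega : j < k + 1), if_pos h, List.getElem?_modify]
      cases hc : cols[j]? <;> simp [hc, show ¬ k = j by omega]
    · rw [if_pos (by omega : j < j + 1), if_neg (by omega : ¬ j < j), Nat.sub_self,
        List.getElem?_cons_zero]
      show (cols.modify j (fun c => c ++ [v]))[j]? = Option.map (fun c => c ++ [v]) cols[j]?
      rw [List.getElem?_modify]
      cases hc : cols[j]? <;> simp [hc]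
    · rw [if_neg (by omega : ¬ j < k + 1), if_neg (by omega : ¬ j < k),
        (by omega : j - k = (j - (k + 1)) + 1), List.getElem?_cons_succ]
      cases hv : vs[j - (k + 1)]? <;>
        cases hc : cols[j]? <;>
          simp [hv, hc, List.getElem?_modify, show ¬ k = j by omega]

-- pointwise characterisation of B's inner set loop
theorem pv_charB (r : List Int) : ∀ (k : Nat) (sz : List Int) (j : Nat),
    ((r.zipIdx k).foldl (fun s p => s.set p.2 (max (s.getD p.2 0) p.1)) sz)[j]? =
      if j < k then sz[j]?
      else match r[j - k]? with
        | some v => (sz[j]?).map (fun m => max m v)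
        | none => sz[j]? := by
  induction r with
  | nil =>
    intro k sz j
    simp only [List.zipIdx_nil, List.foldl_nil, List.getElem?_nil]
    split <;> rfl
  | cons v vs ih =>
    intro k sz j
    rw [List.zipIdx_cons, List.foldl_cons, ih (k + 1)]
    rcases Nat.lt_trichotomy j k with h | rfl | h
    · rw [if_pos (by omega : j < k + 1), if_pos h, List.getElem?_set,
        if_neg (by omega : ¬ k = j)]
    · rw [if_pos (by omega : j < j + 1), if_neg (by omega : ¬ j < j), Nat.sub_self,
        List.getElem?_cons_zero]
      show (sz.set j (max (sz.getD j 0) v))[j]? = Option.map (fun m => max m v) sz[j]?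
      rw [List.getElem?_set, if_pos rfl]
      by_cases hlen : j < sz.length
      · rw [if_pos hlen, List.getElem?_eq_getElem hlen]
        simp [List.getD_eq_getElem?_getD, List.getElem?_eq_getElem hlen]
      · rw [if_neg hlen, List.getElem?_eq_none (by omega)]
        rfl
    · rw [if_neg (by omega : ¬ j < k + 1), if_neg (by omega : ¬ j < k),
        (by omega : j - k = (j - (k + 1)) + 1), List.getElem?_cons_succ,
        List.getElem?_set, if_neg (by omega : ¬ k = j)]

-- pointwise characterisation of A's whole row loop (parse_columns body)
theorem pv_charRowsA (rows : List (List Int)) : ∀ (cols : List (List Int)) (j : Nat),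
    (rows.foldl
      (fun cols row =>
        (row.zipIdx).foldl (fun cs p => cs.modify p.2 (fun c => c ++ [p.1])) cols)
      cols)[j]? =
      (cols[j]?).map (fun c => c ++ rows.filterMap (fun r => r[j]?)) := by
  induction rows with
  | nil => intro cols j; cases hc : cols[j]? <;> simp [hc]
  | cons r rs ih =>
    intro cols j
    rw [List.foldl_cons, ih, pv_charA r 0 cols j]
    simp only [Nat.not_lt_zero, if_false, Nat.sub_zero, List.filterMap_cons]
    cases hr : r[j]? <;> cases hc : cols[j]? <;> simp [hr, hc]

-- pointwise characterisation of B's whole row loop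
theorem pv_charRowsB (rows : List (List Int)) : ∀ (sz : List Int) (j : Nat),
    (rows.foldl
      (fun sizes row =>
        (row.zipIdx).foldl (fun s p => s.set p.2 (max (s.getD p.2 0) p.1)) sizes)
      sz)[j]? =
      (sz[j]?).map (fun m => (rows.filterMap (fun r => r[j]?)).foldl max m) := by
  induction rows with
  | nil => intro sz j; cases hs : sz[j]? <;> simp [hs]
  | cons r rs ih =>
    intro sz j
    rw [List.foldl_cons, ih, pv_charB r 0 sz j]
    simp only [Nat.not_lt_zero, if_false, Nat.sub_zero, List.filterMap_cons]
    cases hr : r[j]? <;> cases hs : sz[j]? <;> simp [hr, hs]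

-- B's inner loop over (Int × Int) pairs is the Int-level loop over the mapped row
theorem pv_B_inner_map (row : List (Int × Int)) : ∀ (k : Nat) (sz : List Int),
    ((row.zipIdx k).foldl
      (fun sz p => sz.set p.2 (max (sz.getD p.2 0) (pvLen p.1))) sz) =
    (((row.map pvLen).zipIdx k).foldl (fun s p => s.set p.2 (max (s.getD p.2 0) p.1)) sz) := by
  induction row with
  | nil => intro k sz; rfl
  | cons h t ih =>
    intro k sz
    simp only [List.map_cons, List.zipIdx_cons, List.foldl_cons, ih]

theorem pv_if_max (m s : Int) : (if s > m then s else m) = max m s := by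
  split <;> omega

-- ===== VERDICT (by name: the statement is the Claim_ definition above) =====
theorem find_ideal_sizes_spec : Claim_equal_find_ideal_sizes := by
  intro sched _ hpre
  obtain ⟨hne, hlen⟩ := hpre
  cases sched with
  | nil => exact absurd rfl hne
  | cons first rest =>
    unfold Spec_find_ideal_sizes find_ideal_sizes find_ideal_sizes_alt
    have hpv : ∀ h : Int × Int, PySem.Str.len (PySem.Int.toStr h.2) = pvLen h :=
      fun _ => rfl
    simp only [hpv]
    -- A's row-building loops are maps
    rw [pv_foldl_push (fun hrs : List (Int × Int) =>
          hrs.foldl (fun l h => l ++ [pvLen h]) []) (first :: rest) []]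
    have hrow : ∀ hrs : List (Int × Int),
        hrs.foldl (fun l h => l ++ [pvLen h]) [] = hrs.map pvLen := by
      intro hrs
      rw [pv_foldl_push pvLen hrs []]
      rfl
    simp only [List.nil_append, hrow]
    -- A's final loop is a map of the per-column max scan
    rw [pv_foldl_push (fun sizes : List Int =>
          sizes.foldl (fun m s => if s > m then s else m) (sizes.headD 0))]
    simp only [List.nil_append]
    -- B's loops become the Int-level loops over the mapped rows
    rw [show (rest.foldl
        (fun sizes row =>
          (row.zipIdx).foldl
            (fun sz p => sz.set p.2 (max (sz.getD p.2 0) (pvLen p.1))) sizes)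
        (first.map pvLen)) =
        ((rest.map (fun r => r.map pvLen)).foldl
          (fun sizes row =>
            (row.zipIdx).foldl (fun s p => s.set p.2 (max (s.getD p.2 0) p.1)) sizes)
          (first.map pvLen)) from by
      rw [List.foldl_map]
      exact pv_foldl_ext _ _ (fun sz row => pv_B_inner_map row 0 sz) rest (first.map pvLen)]
    -- pointwise comparison
    apply List.ext_getElem?
    intro j
    rw [List.getElem?_map, pv_charRowsB]
    unfold parse_columns
    simp only [List.map_cons, List.headD_cons, List.length_map]
    rw [pv_charRowsA, List.getElem?_replicate]
    by_cases hj : j < first.length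
    · have hj' : j < (first.map pvLen).length := by simpa using hj
      rw [if_pos hj, List.filterMap_cons, List.getElem?_eq_getElem hj']
      simp only [Option.map_some, List.nil_append]
      congr 1
      rw [List.headD_cons, List.foldl_cons,
        show (if (first.map pvLen)[j] > (first.map pvLen)[j] then (first.map pvLen)[j]
          else (first.map pvLen)[j]) = (first.map pvLen)[j] from by split <;> rfl]
      exact pv_foldl_ext _ _ pv_if_max _ _
    · have hj' : (first.map pvLen).length ≤ j := by simpa using Nat.le_of_not_lt hj
      rw [if_neg hj, List.getElem?_eq_none hj']
      rfl
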